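-- pv_equiv track=rewrite | github.com/nicklave/Progetti_esercizi_unical | Esercizi_python/grafi_copertura.py | minimoScore
-- ===== SOURCE A (Python) =====
-- def minimoScore(g):
--     minimo = 6
--     for i in range(len(g)):
--         count = 0
--         for j in range(len(g)):
--             if g[j][i] == 1 and (j + 1) % 2 == 0:
--                 count += 1
--         if count < minimo:
--             minimo = count
--     return minimo
-- ===== SOURCE B (Python) =====
-- def minimoScore(g):
--     n = len(g)
--     counts = [0] * n
--     for j in range(n):
--         if j % 2 == 1:
--             row = g[j]
--             for i in range(n):
--                 if row[i] == 1:
--                     counts[i] += 1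
--     return min(counts + [6])
-- ===== Notes on version B (the rewrite author's own statement) =====
-- stated objective: alternative
-- what changed: Replaces the column-by-column rescan (for each column, re-scan all rows) by a single scatter pass that walks each odd row once, accumulating a per-column counts table, then takes min(counts+[6]); the traversal order and maintained state are transposed.
import Mathlib
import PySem

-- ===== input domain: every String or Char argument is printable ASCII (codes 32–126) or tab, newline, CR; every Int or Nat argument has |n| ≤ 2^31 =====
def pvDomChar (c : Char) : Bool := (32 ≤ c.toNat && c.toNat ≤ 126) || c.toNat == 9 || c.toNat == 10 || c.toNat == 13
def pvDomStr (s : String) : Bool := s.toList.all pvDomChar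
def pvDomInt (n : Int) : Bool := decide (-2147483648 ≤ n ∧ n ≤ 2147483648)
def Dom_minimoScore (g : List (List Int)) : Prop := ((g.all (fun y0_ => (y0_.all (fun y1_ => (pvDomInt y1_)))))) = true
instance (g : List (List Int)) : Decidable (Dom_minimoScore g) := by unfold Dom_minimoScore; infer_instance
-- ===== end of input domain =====

-- B replaces A's column-by-column rescan by one scatter pass over the odd rows that
-- maintains a per-column counts table, then takes min(counts+[6]) (alternative decomposition).

-- ===== PORT A =====
def minimoScore (g : List (List Int)) : Int :=
  (PySem.List.pyRange 0 (g.length : Int) 1).foldl (fun minimo i =>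
    let count : Int := (PySem.List.pyRange 0 (g.length : Int) 1).foldl (fun count j =>
      if PySem.List.pyGetD (PySem.List.pyGetD g j []) i 0 == 1 && PySem.Int.mod (j + 1) 2 == 0
      then count + 1 else count) 0
    if count < minimo then count else minimo) 6

-- ===== PORT B =====
def minimoScore_alt (g : List (List Int)) : Int :=
  let n : Int := (g.length : Int)
  let counts0 : List Int := List.replicate g.length 0
  let counts := (PySem.List.pyRange 0 n 1).foldl (fun counts j =>
    if PySem.Int.mod j 2 == 1 then
      let row := PySem.List.pyGetD g j []
      (PySem.List.pyRange 0 n 1).foldl (fun counts i =>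
        if PySem.List.pyGetD row i 0 == 1
        then PySem.List.pySetD counts i (PySem.List.pyGetD counts i 0 + 1)
        else counts) counts
    else counts) counts0
  (PySem.List.min? (counts ++ [6]) (fun x => x)).getD 0

-- ===== PRECONDITION & SPEC =====
-- Python A indexes g[j][i] for all i, j < len(g), so it raises IndexError iff some row is
-- shorter than len(g); Pre_ admits exactly the inputs on which A returns.
def Pre_minimoScore (g : List (List Int)) : Prop := ∀ row ∈ g, g.length ≤ row.length
instance (g : List (List Int)) : Decidable (Pre_minimoScore g) := by unfold Pre_minimoScore; infer_instance
def pvWitness_minimoScore : List (List Int) := [[1, 0], [0, 1]]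

def Spec_minimoScore (g : List (List Int)) (out : Int) : Prop := out = minimoScore_alt g
instance (g : List (List Int)) (out : Int) : Decidable (Spec_minimoScore g out) := by unfold Spec_minimoScore; infer_instance

-- ===== CLAIM (what is proved, stated in full; the proofs are below) =====
def Claim_equal_minimoScore : Prop := ∀ (g : List (List Int)), Dom_minimoScore g → Pre_minimoScore g → Spec_minimoScore g (minimoScore g)

-- ===== LEMMAS AND PROOFS =====

-- the common parity test, on nonnegative (range-produced) indices
theorem pv_parity (j : Nat) :
    (PySem.Int.mod ((j : Int) + 1) 2 == 0) = (PySem.Int.mod (j : Int) 2 == 1) := by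
  simp [PySem.Int.mod, Int.fmod_eq_emod]
  omega

-- B's inner scatter pass preserves the length of the counts table
theorem pv_inner_length (row : List Int) (ks : List Nat) (cs : List Int) :
    (ks.foldl (fun cs i => if row.getD i 0 == 1 then cs.set i (cs.getD i 0 + 1) else cs) cs).length
      = cs.length := by
  induction ks generalizing cs with
  | nil => rfl
  | cons i t ih =>
      simp only [List.foldl_cons]
      split
      · rw [ih, List.length_set]
      · exact ih cs

-- effect of B's inner scatter pass on one cell of the counts table
theorem pv_inner_getD (row : List Int) (ks : List Nat) (cs : List Int) (k : Nat)
    (hk : k < cs.length) (hks : ∀ i ∈ ks, i < cs.length) :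
    (ks.foldl (fun cs i => if row.getD i 0 == 1 then cs.set i (cs.getD i 0 + 1) else cs) cs).getD k 0
      = cs.getD k 0 + (ks.countP (fun i => i == k && row.getD i 0 == 1) : Int) := by
  induction ks generalizing cs with
  | nil => simp
  | cons i t ih =>
      simp only [List.foldl_cons, List.countP_cons]
      by_cases hc : (row.getD i 0 == 1) = true
      · rw [if_pos hc]
        have hi : i < cs.length := hks i (by simp)
        have hlen : (cs.set i (cs.getD i 0 + 1)).length = cs.length := List.length_set ..
        rw [ih _ (by omega) (fun x hx => by rw [hlen]; exact hks x (by simp [hx]))]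
        by_cases hik : i = k
        · subst hik
          have hset : (cs.set i (cs.getD i 0 + 1)).getD i 0 = cs.getD i 0 + 1 := by
            rw [List.getD_eq_getElem _ _ (by omega), List.getElem_set]
            simp
          rw [hset, hc]
          simp only [BEq.rfl, Bool.true_and, if_pos]
          push_cast
          ring
        · have hset : (cs.set i (cs.getD i 0 + 1)).getD k 0 = cs.getD k 0 := by
            rw [List.getD_eq_getElem _ _ (by omega), List.getElem_set, if_neg hik,
              List.getD_eq_getElem _ _ hk]
          have hb : (i == k) = false := by simp [hik]
          rw [hset, hb, Bool.false_and]
          simp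
      · rw [Bool.not_eq_true] at hc
        rw [hc]
        simp only [Bool.false_eq_true, if_false, Bool.and_false]
        rw [ih cs hk (fun x hx => hks x (by simp [hx]))]
        simp

-- counting a single index in a duplicate-free list
theorem pv_countP_single (ks : List Nat) (k : Nat) (q : Nat → Bool)
    (hnd : ks.Nodup) (hm : k ∈ ks) :
    ks.countP (fun i => i == k && q i) = if q k then 1 else 0 := by
  induction ks with
  | nil => simp at hm
  | cons i t ih =>
      rw [List.nodup_cons] at hnd
      rw [List.countP_cons]
      by_cases hik : i = k
      · subst hik
        have h0 : t.countP (fun x => x == i && q x) = 0 := by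
          rw [List.countP_eq_zero]
          intro a ha
          have : a ≠ i := fun h => hnd.1 (h ▸ ha)
          simp [this]
        rw [h0]
        by_cases hq : q i <;> simp [hq]
      · have hkt : k ∈ t := by
          rcases List.mem_cons.mp hm with h | h
          · exact absurd h.symm hik
          · exact h
        have : ((i == k) && q i) = false := by simp [hik]
        rw [this, ih hnd.2 hkt]
        simp

-- B's outer scatter loop: the counts table tallies, per column, the odd rows with a 1
theorem pv_outer (g : List (List Int)) (js : List Nat) (counts : List Int)
    (hlen : counts.length = g.length) :
    (js.foldl (fun counts (j : Nat) =>
        if PySem.Int.mod (j : Int) 2 == 1 then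
          (List.range g.length).foldl
            (fun cs i => if (g.getD j []).getD i 0 == 1 then cs.set i (cs.getD i 0 + 1) else cs) counts
        else counts) counts).length = g.length ∧
    ∀ k < g.length,
      (js.foldl (fun counts (j : Nat) =>
          if PySem.Int.mod (j : Int) 2 == 1 then
            (List.range g.length).foldl
              (fun cs i => if (g.getD j []).getD i 0 == 1 then cs.set i (cs.getD i 0 + 1) else cs) counts
          else counts) counts).getD k 0
        = counts.getD k 0 +
          (js.countP (fun (j : Nat) => PySem.Int.mod (j : Int) 2 == 1 && (g.getD j []).getD k 0 == 1) : Int) := by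
  induction js generalizing counts with
  | nil => simp [hlen]
  | cons j t ih =>
      simp only [List.foldl_cons, List.countP_cons]
      by_cases hj : PySem.Int.mod (j : Int) 2 == 1
      · simp only [hj, if_pos]
        have hlen' : ((List.range g.length).foldl
            (fun cs i => if (g.getD j []).getD i 0 == 1 then cs.set i (cs.getD i 0 + 1) else cs)
            counts).length = g.length := by
          rw [pv_inner_length]; exact hlen
        obtain ⟨ih1, ih2⟩ := ih _ hlen'
        refine ⟨ih1, fun k hk => ?_⟩
        rw [ih2 k hk]
        rw [pv_inner_getD _ _ _ _ (by omega) (fun x hx => by rw [hlen]; exact List.mem_range.mp hx)]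
        rw [pv_countP_single _ _ _ List.nodup_range (List.mem_range.mpr hk)]
        simp only [Bool.true_and]
        push_cast
        ring
      · simp only [hj]
        rw [if_neg (by simp_all)]
        obtain ⟨ih1, ih2⟩ := ih _ hlen
        refine ⟨ih1, fun k hk => ?_⟩
        rw [ih2 k hk]
        simp

-- the minimum-update loop is a fold of `min`
theorem pv_foldl_if_min (l : List Int) (a : Int) :
    l.foldl (fun m x => if x < m then x else m) a = l.foldl min a := by
  induction l generalizing a with
  | nil => rfl
  | cons x t ih =>
      simp only [List.foldl_cons]
      have : (if x < a then x else a) = min a x := by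
        rw [min_def]; split_ifs <;> omega
      rw [this, ih]

theorem pv_foldl_min_assoc (t : List Int) (a b : Int) :
    t.foldl min (min a b) = min a (t.foldl min b) := by
  induction t generalizing b with
  | nil => rfl
  | cons x t ih =>
      simp only [List.foldl_cons]
      rw [min_assoc, ih]

-- Python's min(l + [6]) equals A's running-minimum loop started at 6
theorem pv_min_append (l : List Int) :
    (PySem.List.min? (l ++ [6]) (fun x => x)).getD 0
      = l.foldl (fun m x => if x < m then x else m) 6 := by
  rw [pv_foldl_if_min]
  cases l with
  | nil => simp [PySem.List.min?_id_cons]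
  | cons c t =>
      rw [List.cons_append, PySem.List.min?_id_cons, Option.getD_some,
        List.foldl_append, List.foldl_cons, List.foldl_nil, List.foldl_cons,
        pv_foldl_min_assoc, min_comm]

-- the per-column count that A's inner loop computes
theorem pv_colcount (g : List (List Int)) (i : Nat) :
    (List.range g.length).foldl (fun count (j : Nat) =>
        if (g.getD j []).getD i 0 == 1 && PySem.Int.mod ((j : Int) + 1) 2 == 0
        then count + 1 else count) (0 : Int)
      = ((List.range g.length).countP
          (fun (j : Nat) => PySem.Int.mod (j : Int) 2 == 1 && (g.getD j []).getD i 0 == 1) : Int) := by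
  rw [PySem.List.foldl_count_if, zero_add]
  congr 1
  apply List.countP_congr
  intro j _
  rw [pv_parity, Bool.and_comm]

-- ===== VERDICT (by name: the statement is the Claim_ definition above) =====
theorem minimoScore_spec : Claim_equal_minimoScore := by
  intro g _ _
  unfold Spec_minimoScore minimoScore minimoScore_alt
  simp only [PySem.List.pyRange_zero_nat, List.foldl_map, PySem.List.pyGetD_natCast,
    PySem.List.pySetD_natCast]
  -- name the column-count function
  set c : Nat → Int := fun i =>
    ((List.range g.length).countP
      (fun (j : Nat) => PySem.Int.mod (j : Int) 2 == 1 && (g.getD j []).getD i 0 == 1) : Int) with hc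
  -- A's side: each inner loop computes c i
  have hA : (List.range g.length).foldl (fun minimo i =>
      let count : Int := (List.range g.length).foldl (fun count (j : Nat) =>
        if (g.getD j []).getD i 0 == 1 && PySem.Int.mod ((j : Int) + 1) 2 == 0
        then count + 1 else count) 0
      if count < minimo then count else minimo) 6
      = ((List.range g.length).map c).foldl (fun m x => if x < m then x else m) 6 := by
    rw [List.foldl_map]
    apply PySem.List.foldl_congr_mem
    intro m i _
    simp only [pv_colcount, hc]
  rw [hA]
  -- B's side: the counts table equals (List.range n).map c
  obtain ⟨hl, hv⟩ := pv_outer g (List.range g.length) (List.replicate g.length 0) (by simp)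
  have hcf : (List.range g.length).foldl (fun counts (j : Nat) =>
      if PySem.Int.mod (j : Int) 2 == 1 then
        (List.range g.length).foldl
          (fun cs i => if (g.getD j []).getD i 0 == 1 then cs.set i (cs.getD i 0 + 1) else cs) counts
      else counts) (List.replicate g.length 0) = (List.range g.length).map c := by
    apply List.ext_getElem
    · rw [hl]; simp
    · intro k h1 h2
      have hk : k < g.length := hl ▸ h1
      rw [← List.getD_eq_getElem _ 0 h1, hv k hk]
      simp [hc]
  rw [hcf, pv_min_append]
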